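-- pv_equiv track=rewrite | github.com/thealper2/codewars-solutions | 7-kyu/find_the_index_of_the_second_occurrence_of_a_letter_in_a_string.py | second_symbol
-- ===== SOURCE A (Python) =====
-- def second_symbol(s, symbol):
--     n = len(s)
--     for i in range(n):
--         if s[i] == symbol:
--             for j in range(i + 1, n):
--                 if s[j] == symbol:
--                     return j
--
--     return -1
-- ===== SOURCE B (Python) =====
-- def second_symbol(s, symbol):
--     count = 0
--     for i, c in enumerate(s):
--         if c == symbol:
--             count += 1
--             if count == 2:
--                 return i
--     return -1
-- ===== Notes on version B (the rewrite author's own statement) =====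
-- stated objective: simpler
-- what changed: Replaced the nested rescanning loops (find first match, then scan the tail for the next) by one flat enumerate pass maintaining a match counter and returning the index when the counter reaches 2.
import Mathlib
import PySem

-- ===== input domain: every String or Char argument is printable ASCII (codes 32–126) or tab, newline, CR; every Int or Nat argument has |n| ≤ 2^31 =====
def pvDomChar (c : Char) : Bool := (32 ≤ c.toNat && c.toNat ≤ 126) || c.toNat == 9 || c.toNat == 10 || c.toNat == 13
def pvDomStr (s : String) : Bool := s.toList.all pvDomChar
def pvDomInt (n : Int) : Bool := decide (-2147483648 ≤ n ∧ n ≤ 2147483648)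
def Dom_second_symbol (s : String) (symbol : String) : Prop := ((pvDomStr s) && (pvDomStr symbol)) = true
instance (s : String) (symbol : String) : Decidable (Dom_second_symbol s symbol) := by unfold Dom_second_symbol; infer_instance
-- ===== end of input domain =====

-- B replaces A's nested rescanning loops by one flat pass with a running match counter (objective: simpler).

-- ===== PORT A =====
-- inner loop: for j in range(i+1, n): if s[j] == symbol: return j   (some j = early return)
def pvAInner (sym : List Char) : List Char → Int → Option Int
  | [], _ => none
  | c :: rest, j => if [c] = sym then some j else pvAInner sym rest (j + 1)

-- outer loop: for i in range(n): if s[i] == symbol: <inner>; after the loop return -1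
def pvAOuter (sym : List Char) : List Char → Int → Int
  | [], _ => -1
  | c :: rest, i =>
      if [c] = sym then
        match pvAInner sym rest (i + 1) with
        | some j => j
        | none => pvAOuter sym rest (i + 1)
      else pvAOuter sym rest (i + 1)

def second_symbol (s : String) (symbol : String) : Int :=
  pvAOuter symbol.toList s.toList 0

-- ===== PORT B =====
-- single pass with enumerate and a counter; return i when the counter reaches 2
def pvBLoop (sym : List Char) : List Char → Int → Int → Int
  | [], _, _ => -1
  | c :: rest, i, count =>
      if [c] = sym then
        if count + 1 = 2 then i else pvBLoop sym rest (i + 1) (count + 1)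
      else pvBLoop sym rest (i + 1) count

def second_symbol_alt (s : String) (symbol : String) : Int :=
  pvBLoop symbol.toList s.toList 0 0

-- ===== PRECONDITION & SPEC =====
def Spec_second_symbol (s : String) (symbol : String) (out : Int) : Prop := out = second_symbol_alt s symbol
instance (s : String) (symbol : String) (out : Int) : Decidable (Spec_second_symbol s symbol out) := by unfold Spec_second_symbol; infer_instance

-- ===== CLAIM (what is proved, stated in full; the proofs are below) =====
def Claim_equal_second_symbol : Prop := ∀ (s : String) (symbol : String), Dom_second_symbol s symbol → Spec_second_symbol s symbol (second_symbol s symbol)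

-- ===== LEMMAS AND PROOFS =====

-- if the tail contains no match, A's outer loop returns -1 on it
theorem pvAOuter_of_inner_none (sym : List Char) (cs : List Char) (i : Int)
    (h : pvAInner sym cs i = none) : pvAOuter sym cs i = -1 := by
  induction cs generalizing i with
  | nil => rfl
  | cons c rest ih =>
      simp only [pvAInner] at h
      simp only [pvAOuter]
      split_ifs with hc
      · simp [hc] at h
      · simp [hc] at h
        exact ih _ h

-- B's loop with count = 1 behaves as A's inner scan (next match index, else -1)
theorem pvBLoop_one (sym : List Char) (cs : List Char) (i : Int) :
    pvBLoop sym cs i 1 = (match pvAInner sym cs i with | some j => j | none => -1) := by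
  induction cs generalizing i with
  | nil => rfl
  | cons c rest ih =>
      simp only [pvBLoop, pvAInner]
      by_cases hc : [c] = sym
      · simp [hc]
      · simp [hc, ih]

-- A's outer loop equals B's loop with count = 0
theorem pvAOuter_eq_pvBLoop (sym : List Char) (cs : List Char) (i : Int) :
    pvAOuter sym cs i = pvBLoop sym cs i 0 := by
  induction cs generalizing i with
  | nil => rfl
  | cons c rest ih =>
      simp only [pvAOuter, pvBLoop]
      by_cases hc : [c] = sym
      · rw [if_pos hc, if_pos hc,
            if_neg (by norm_num : ¬((0 : Int) + 1 = 2)),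
            (by norm_num : (0 : Int) + 1 = 1), pvBLoop_one]
        cases h : pvAInner sym rest (i + 1) with
        | some j => rfl
        | none => exact pvAOuter_of_inner_none sym rest (i + 1) h
      · rw [if_neg hc, if_neg hc]
        exact ih _

-- ===== VERDICT (by name: the statement is the Claim_ definition above) =====
theorem second_symbol_spec : Claim_equal_second_symbol := by
  intro s symbol _
  unfold Spec_second_symbol second_symbol second_symbol_alt
  exact pvAOuter_eq_pvBLoop _ _ _
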